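-- pv_equiv track=rewrite | github.com/MichelAguilera/hackerrank-files | staircase2.py | fab_row
-- ===== SOURCE A (Python) =====
-- def fab_row(n, i, string):
--     string += " " * (n - i)
--     string += "#" * i
--     string += "\n"
--     if i == n:
--         return string
--     else:
--         return fab_row(n, i + 1, string)
-- ===== SOURCE B (Python) =====
-- def fab_row(n, i, string):
--     return string + "".join(" " * (n - k) + "#" * k + "\n" for k in range(i, n + 1))
-- ===== Notes on version B (the rewrite author's own statement) =====
-- stated objective: simpler
-- what changed: Replaces the linear recursion that threads a growing accumulator through calls with a single join over range(i, n+1) building each row directly.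
import Mathlib
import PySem

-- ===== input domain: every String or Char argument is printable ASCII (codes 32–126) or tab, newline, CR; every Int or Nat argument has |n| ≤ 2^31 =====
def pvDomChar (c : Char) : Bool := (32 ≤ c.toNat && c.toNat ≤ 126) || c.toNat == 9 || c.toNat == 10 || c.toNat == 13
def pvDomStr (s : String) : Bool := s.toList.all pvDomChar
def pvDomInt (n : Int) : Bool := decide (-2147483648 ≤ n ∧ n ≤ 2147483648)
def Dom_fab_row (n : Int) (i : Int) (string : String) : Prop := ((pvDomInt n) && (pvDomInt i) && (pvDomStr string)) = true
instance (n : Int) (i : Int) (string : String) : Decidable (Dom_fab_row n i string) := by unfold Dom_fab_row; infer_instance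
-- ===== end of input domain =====

-- B replaces A's accumulator-threading linear recursion with a single join over range(i, n+1); equivalence proved for i ≤ n (A recurses forever otherwise).


-- ===== PORT A =====
-- literal port of A; the final 'else s' branch is a totality guard: for i > n the Python recurses forever (excluded by Pre_)
def fab_row (n : Int) (i : Int) (string : String) : String :=
  let s := string ++ String.mk (List.replicate (n - i).toNat ' ')
             ++ String.mk (List.replicate i.toNat '#') ++ "\n"
  if i = n then s
  else if _h : i < n then fab_row n (i + 1) s
  else s
termination_by (n - i).toNat
decreasing_by omega

-- ===== PORT B =====
def fab_row_alt (n : Int) (i : Int) (string : String) : String :=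
  string ++ String.join ((PySem.List.pyRange i (n + 1) 1).map (fun k =>
    String.mk (List.replicate (n - k).toNat ' ')
      ++ String.mk (List.replicate k.toNat '#') ++ "\n"))

-- ===== PRECONDITION & SPEC =====
-- Pre_ excludes i > n, on which Python A recurses without bound (RecursionError), returning nothing.
def Pre_fab_row (n : Int) (i : Int) (string : String) : Prop := i ≤ n
instance (n : Int) (i : Int) (string : String) : Decidable (Pre_fab_row n i string) := by unfold Pre_fab_row; infer_instance
def pvWitness_fab_row : Int × Int × String := (4, 1, "")

def Spec_fab_row (n : Int) (i : Int) (string : String) (out : String) : Prop := out = fab_row_alt n i string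
instance (n : Int) (i : Int) (string : String) (out : String) : Decidable (Spec_fab_row n i string out) := by unfold Spec_fab_row; infer_instance

-- ===== CLAIM (what is proved, stated in full; the proofs are below) =====
def Claim_equal_fab_row : Prop := ∀ (n : Int) (i : Int) (string : String), Dom_fab_row n i string → Pre_fab_row n i string → Spec_fab_row n i string (fab_row n i string)

-- ===== LEMMAS AND PROOFS =====

lemma foldl_append_str (l : List String) : ∀ (a b : String),
    List.foldl (fun r s => r ++ s) (a ++ b) l = a ++ List.foldl (fun r s => r ++ s) b l := by
  induction l with
  | nil => intro a b; rfl
  | cons h t ih => intro a b; simp only [List.foldl, String.append_assoc]; exact ih a (b ++ h)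

lemma fab_row_eq_alt (m : Nat) : ∀ (n i : Int) (s : String), (n - i).toNat = m → i ≤ n →
    fab_row n i s = fab_row_alt n i s := by
  induction m with
  | zero =>
    intro n i s hm hle
    have h : i = n := by omega
    subst h
    rw [fab_row, fab_row_alt]
    simp only []
    rw [PySem.List.pyRange_one_cons (by omega : i < i + 1)]
    have : PySem.List.pyRange (i + 1) (i + 1) 1 = [] := by
      simp [PySem.List.pyRange]
    rw [this]
    simp [String.join, String.append_assoc]
  | succ m ih =>
    intro n i s hm hle
    have hlt : i < n := by omega
    rw [fab_row, fab_row_alt]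
    simp only [if_neg (by omega : ¬ i = n), dif_pos hlt]
    rw [ih n (i + 1) _ (by omega) (by omega)]
    rw [fab_row_alt]
    rw [PySem.List.pyRange_one_cons (by omega : i < n + 1)]
    simp only [List.map_cons, String.join, List.foldl, String.append_assoc, String.empty_append, String.append_empty,
      ← foldl_append_str]

-- ===== VERDICT (by name: the statement is the Claim_ definition above) =====
theorem fab_row_spec : Claim_equal_fab_row := by
  intro n i s _ hpre
  exact fab_row_eq_alt (n - i).toNat n i s rfl hpre
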